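-- pv_equiv track=rewrite | github.com/EitanTal/PyJigsaw | 2000/processor2000.py | rejectNonCornerMaximas
-- ===== SOURCE A (Python) =====
-- def findNearestElem(elem, vals):
-- 	best = vals[0]
-- 	bestdist = abs(elem-vals[0])
-- 	for v in vals:
-- 		dist = abs(elem - v)
-- 		if (dist < bestdist):
-- 			bestdist = dist
-- 			best = v
-- 	return best
--
-- def findNearestDistance(elem, vals):
-- 	k = findNearestElem(elem, vals)
-- 	return abs(k-elem)
--
-- def findDistanceOnCircle(elem, vals):
-- 	circ = []
-- 	for v in vals:
-- 		circ.append(v-360)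
-- 		circ.append(v)
-- 		circ.append(v+360)
--
-- 	d = findNearestDistance(elem, circ)
-- 	return d
--
-- def rejectNonCornerMaximas(records, maxdist):
-- 	# sometimes there's maximas in the bottom of the dips. Take em out.
-- 	records_ = []
-- 	angles = []
-- 	for r in records:
-- 		if r[1] > 100:
-- 			records_ += [r]
-- 			angles += [r[0]]
-- 		else:
-- 			print ('!! Rejected a suspected non-corner:', r,'for being inside a dip')
--
-- 	# Continue...
-- 	records_ = sorted(records_,key=lambda x: x[0]) # Sort by angle
--
-- 	# Special case for a + peice: it will have 8 results. four corners and four knobs. Select the ones closest to diagonals.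
-- 	if len(records_) == 8:
-- 		print ('!! Encountered a suspicuos + shape. Guessing corners that line up with diagonals')
-- 		first = records_[0][0]
-- 		if (first < 25): return records_[1::2]
-- 		else: return records_[0::2]
--
-- 	# If this is a corner, then 3 other corners should be at +90, +180 and +270 roughly speaking, as peices are mostly square-ish.
-- 	result = []
-- 	for r in records_:
-- 		ang = r[0]
-- 		c2 = findDistanceOnCircle(ang+90, angles)
-- 		c3 = findDistanceOnCircle(ang+180, angles)
-- 		c4 = findDistanceOnCircle(ang-90, angles) # 270
-- 		# Do not tolerate if more than 20 degrees away
-- 		limit = maxdist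
-- 		if ((c2 < limit) and (c3 < limit) and (c4 < limit)):
-- 			result += [r]
--
-- 	return result
-- ===== SOURCE B (Python) =====
-- def rejectNonCornerMaximas(records, maxdist):
--     # Sort the +-360-expanded angle list once and answer each nearest-distance
--     # query by binary search, instead of a linear scan over a freshly built
--     # expanded list per query.
--     kept = [r for r in records if r[1] > 100]
--     angles = [r[0] for r in kept]
--     kept = sorted(kept, key=lambda x: x[0])
--
--     if len(kept) == 8:
--         return kept[1::2] if kept[0][0] < 25 else kept[0::2]
--
--     circ = sorted(v + s for v in angles for s in (-360, 0, 360))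
--     n = len(circ)
--
--     def near(e):
--         lo, hi = 0, n
--         while lo < hi:
--             mid = (lo + hi) // 2
--             if circ[mid] < e:
--                 lo = mid + 1
--             else:
--                 hi = mid
--         cands = []
--         if lo > 0:
--             cands.append(e - circ[lo - 1])
--         if lo < n:
--             cands.append(circ[lo] - e)
--         return min(cands)
--
--     return [r for r in kept
--             if all(near(r[0] + s) < maxdist for s in (90, 180, -90))]
-- ===== Notes on version B (the rewrite author's own statement) =====
-- stated objective: faster
-- what changed: B filters/collects with comprehensions, builds the +-360-expanded angle list once and sorts it, and answers each nearest-distance query by binary search over that sorted list, instead of rebuilding the expanded list and linearly scanning it (tracking the nearest element) for every query.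
import Mathlib
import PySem

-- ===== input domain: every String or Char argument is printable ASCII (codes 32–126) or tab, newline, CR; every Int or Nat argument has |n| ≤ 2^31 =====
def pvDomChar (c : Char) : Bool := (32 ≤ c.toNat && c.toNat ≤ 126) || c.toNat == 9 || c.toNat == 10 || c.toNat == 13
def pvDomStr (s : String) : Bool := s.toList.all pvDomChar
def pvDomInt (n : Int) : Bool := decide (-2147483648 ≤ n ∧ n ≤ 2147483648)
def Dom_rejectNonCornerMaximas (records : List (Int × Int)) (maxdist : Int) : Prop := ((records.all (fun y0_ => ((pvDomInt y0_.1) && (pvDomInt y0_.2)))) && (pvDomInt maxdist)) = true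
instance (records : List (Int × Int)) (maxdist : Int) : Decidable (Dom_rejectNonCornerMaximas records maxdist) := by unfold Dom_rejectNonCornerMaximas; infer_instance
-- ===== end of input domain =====

-- B replaces A's per-query linear scan over a freshly built ±360-expanded list by one sorted
-- expanded list queried by binary search (objective: faster; return values identical).
-- A's print statements are side effects only; the equivalence is about the return value.

-- ===== PORT A =====

-- vals[0] raises IndexError on []; rejectNonCornerMaximas only calls this with nonempty vals,
-- so the [] branch below is unreachable from the entry point.
def findNearestElem (elem : Int) (vals : List Int) : Int :=
  match vals with
  | [] => 0
  | v0 :: _ =>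
    (vals.foldl (fun (st : Int × Int) v =>
        let dist := |elem - v|
        if dist < st.2 then (v, dist) else st)
      (v0, |elem - v0|)).1

def findNearestDistance (elem : Int) (vals : List Int) : Int :=
  let k := findNearestElem elem vals
  |k - elem|

def findDistanceOnCircle (elem : Int) (vals : List Int) : Int :=
  let circ := vals.foldl (fun acc v => acc ++ [v - 360, v, v + 360]) []
  findNearestDistance elem circ

def rejectNonCornerMaximas (records : List (Int × Int)) (maxdist : Int) : List (Int × Int) :=
  let st := records.foldl
    (fun (st : List (Int × Int) × List Int) r =>
      if r.2 > 100 then (st.1 ++ [r], st.2 ++ [r.1]) else st) ([], [])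
  let angles := st.2
  let records_ := PySem.List.sorted st.1 (fun x => x.1) false
  if records_.length == 8 then
    -- records_[0][0]: in this branch records_ has length 8, so headD's default is unreachable
    if (records_.headD (0, 0)).1 < 25 then (PySem.List.slice? records_ (some 1) none 2).getD []
    else (PySem.List.slice? records_ (some 0) none 2).getD []
  else
    records_.foldl (fun result r =>
      let ang := r.1
      let c2 := findDistanceOnCircle (ang + 90) angles
      let c3 := findDistanceOnCircle (ang + 180) angles
      let c4 := findDistanceOnCircle (ang - 90) angles
      let limit := maxdist
      if c2 < limit ∧ c3 < limit ∧ c4 < limit then result ++ [r] else result) []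

-- ===== PORT B =====

-- the while-loop of Source B's `near`: bisect-left on circ between lo and hi
def pvBisect (circ : List Int) (e lo hi : Int) : Int :=
  if h : lo < hi then
    let mid := PySem.Int.floordiv (lo + hi) 2
    -- circ[mid]: 0 ≤ lo ≤ mid < hi ≤ len circ at every call, so the index is in range
    if PySem.List.pyGetD circ mid 0 < e then pvBisect circ e (mid + 1) hi
    else pvBisect circ e lo mid
  else lo
termination_by (hi - lo).toNat
decreasing_by
  · have h1 : lo ≤ PySem.Int.floordiv (lo + hi) 2 :=
      (PySem.Int.le_floordiv_iff_mul_le (by omega)).2 (by omega)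
    omega
  · have h2 : PySem.Int.floordiv (lo + hi) 2 < hi :=
      (PySem.Int.floordiv_lt_iff_lt_mul (by omega)).2 (by omega)
    omega

-- Source B's `near(e)`: min() of the one or two neighbour candidates around the insertion point.
-- min([]) would raise; circ is nonempty whenever `near` is called, so the [] branch is unreachable.
def pvNear (circ : List Int) (e : Int) : Int :=
  let n : Int := circ.length
  let lo := pvBisect circ e 0 n
  let cands :=
    (if lo > 0 then [e - PySem.List.pyGetD circ (lo - 1) 0] else []) ++
    (if lo < n then [PySem.List.pyGetD circ lo 0 - e] else [])
  match cands with
  | [] => 0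
  | c :: cs => cs.foldl min c

def rejectNonCornerMaximas_alt (records : List (Int × Int)) (maxdist : Int) : List (Int × Int) :=
  let kept0 := records.filter (fun r => decide (r.2 > 100))
  let angles := kept0.map (fun r => r.1)
  let kept := PySem.List.sorted kept0 (fun x => x.1) false
  if kept.length == 8 then
    if (kept.headD (0, 0)).1 < 25 then (PySem.List.slice? kept (some 1) none 2).getD []
    else (PySem.List.slice? kept (some 0) none 2).getD []
  else
    let circ := PySem.List.sorted (angles.flatMap (fun v => [(-360 : Int), 0, 360].map (fun s => v + s))) (fun x => x) false
    kept.filter (fun r => ([90, 180, -90] : List Int).all (fun s => decide (pvNear circ (r.1 + s) < maxdist)))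

-- ===== PRECONDITION & SPEC =====
def Spec_rejectNonCornerMaximas (records : List (Int × Int)) (maxdist : Int) (out : List (Int × Int)) : Prop := out = rejectNonCornerMaximas_alt records maxdist
instance (records : List (Int × Int)) (maxdist : Int) (out : List (Int × Int)) : Decidable (Spec_rejectNonCornerMaximas records maxdist out) := by unfold Spec_rejectNonCornerMaximas; infer_instance

-- ===== CLAIM (what is proved, stated in full; the proofs are below) =====
def Claim_equal_rejectNonCornerMaximas : Prop := ∀ (records : List (Int × Int)) (maxdist : Int), Dom_rejectNonCornerMaximas records maxdist → Spec_rejectNonCornerMaximas records maxdist (rejectNonCornerMaximas records maxdist)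

-- ===== LEMMAS AND PROOFS =====


-- A's record/angle collecting loop is filter + map-of-first-components
theorem pv_split (l : List (Int × Int)) (a : List (Int × Int)) (b : List Int) :
    l.foldl (fun (st : List (Int × Int) × List Int) r =>
        if r.2 > 100 then (st.1 ++ [r], st.2 ++ [r.1]) else st) (a, b)
      = (a ++ l.filter (fun r => decide (r.2 > 100)),
         b ++ (l.filter (fun r => decide (r.2 > 100))).map (fun r => r.1)) := by
  induction l generalizing a b with
  | nil => simp
  | cons x xs ih => by_cases h : x.2 > 100 <;> simp [h, ih]

-- A's best/bestdist scan: the distance component is a running min, and it always equals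
-- the distance of the tracked best element
theorem pv_scan (elem : Int) (l : List Int) (best bd : Int) (hinv : bd = |elem - best|) :
    (l.foldl (fun (st : Int × Int) v =>
        let dist := |elem - v|
        if dist < st.2 then (v, dist) else st) (best, bd)).2
      = (l.map (fun v => |elem - v|)).foldl min bd
    ∧ (l.foldl (fun (st : Int × Int) v =>
        let dist := |elem - v|
        if dist < st.2 then (v, dist) else st) (best, bd)).2
      = |elem - (l.foldl (fun (st : Int × Int) v =>
        let dist := |elem - v|
        if dist < st.2 then (v, dist) else st) (best, bd)).1| := by
  induction l generalizing best bd with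
  | nil => simpa using hinv
  | cons v vs ih =>
    by_cases h : |elem - v| < bd
    · have := ih v (|elem - v|) rfl
      simpa [h, min_eq_right (le_of_lt h)] using this
    · have := ih best bd hinv
      simpa [h, min_eq_left (not_lt.mp h)] using this

def pvCirc (vals : List Int) : List Int := vals.flatMap (fun v => [v - 360, v, v + 360])

-- A's findDistanceOnCircle is the minimum distance from elem to the expanded list pvCirc vals
theorem pv_fdoc_spec (elem : Int) (vals : List Int) (h : vals ≠ []) :
    (∃ c ∈ pvCirc vals, findDistanceOnCircle elem vals = |elem - c|)
    ∧ ∀ c ∈ pvCirc vals, findDistanceOnCircle elem vals ≤ |elem - c| := by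
  obtain ⟨v0, vs, rfl⟩ := List.exists_cons_of_ne_nil h
  have hcirc : ((v0 :: vs).foldl (fun acc v => acc ++ [v - 360, v, v + 360]) ([] : List Int))
      = pvCirc (v0 :: vs) := by
    simpa [pvCirc] using
      PySem.List.foldl_append_eq_flatMap (fun v => [v - 360, v, v + 360]) (v0 :: vs) []
  have hc : pvCirc (v0 :: vs) = (v0 - 360) :: (v0 :: (v0 + 360) :: pvCirc vs) := by
    simp [pvCirc]
  unfold findDistanceOnCircle findNearestDistance findNearestElem
  rw [hcirc, hc]
  dsimp only
  have hscan := pv_scan elem ((v0 - 360) :: (v0 :: (v0 + 360) :: pvCirc vs))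
    (v0 - 360) (|elem - (v0 - 360)|) rfl
  set res := ((v0 - 360) :: (v0 :: (v0 + 360) :: pvCirc vs)).foldl
      (fun (st : Int × Int) v =>
        let dist := |elem - v|
        if dist < st.2 then (v, dist) else st) (v0 - 360, |elem - (v0 - 360)|) with hres
  have habs : |res.1 - elem| = res.2 := by rw [hscan.2]; exact abs_sub_comm _ _
  rw [habs, hscan.1]
  have hle := PySem.List.foldl_min_le
    (((v0 - 360) :: (v0 :: (v0 + 360) :: pvCirc vs)).map (fun v => |elem - v|))
    (|elem - (v0 - 360)|)
  have hmem := PySem.List.foldl_min_mem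
    (((v0 - 360) :: (v0 :: (v0 + 360) :: pvCirc vs)).map (fun v => |elem - v|))
    (|elem - (v0 - 360)|)
  constructor
  · rcases hmem with hmem | hmem
    · exact ⟨v0 - 360, by simp, hmem⟩
    · obtain ⟨c, hcmem, hceq⟩ := List.mem_map.1 hmem
      exact ⟨c, hcmem, hceq.symm⟩
  · intro c hcmem
    exact hle.2 _ (List.mem_map.2 ⟨c, hcmem, rfl⟩)

-- diminishing interval: pvBisect preserves the "everything left of lo is < e, everything
-- from hi on is ≥ e" invariant and narrows it to the returned index
theorem pv_bisect_spec (cs : List Int) (e : Int) (hp : cs.Pairwise (· ≤ ·))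
    (fuel : Nat) (lo hi : Int) (hfuel : (hi - lo).toNat ≤ fuel)
    (h0 : 0 ≤ lo) (h1 : lo ≤ hi) (h2 : hi ≤ (cs.length : Int))
    (hlo : ∀ (i : Nat) (h : i < cs.length), (i : Int) < lo → cs[i] < e)
    (hhi : ∀ (i : Nat) (h : i < cs.length), hi ≤ (i : Int) → e ≤ cs[i]) :
    lo ≤ pvBisect cs e lo hi ∧ pvBisect cs e lo hi ≤ hi ∧
    (∀ (i : Nat) (h : i < cs.length), (i : Int) < pvBisect cs e lo hi → cs[i] < e) ∧
    (∀ (i : Nat) (h : i < cs.length), pvBisect cs e lo hi ≤ (i : Int) → e ≤ cs[i]) := by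
  have mono : ∀ (i j : Nat) (hi : i < cs.length) (hj : j < cs.length), i ≤ j → cs[i] ≤ cs[j] := by
    intro i j hi hj hij
    rcases Nat.lt_or_ge i j with hlt | hge
    · exact List.pairwise_iff_getElem.1 hp i j hi hj hlt
    · have : i = j := by omega
      subst this; exact le_refl _
  induction fuel generalizing lo hi with
  | zero =>
    have heq : lo = hi := by omega
    rw [pvBisect]
    have hnlt : ¬ lo < hi := by omega
    simp only [hnlt, dif_neg, not_false_iff]
    exact ⟨le_refl _, by omega,
      fun i h hi2 => hlo i h hi2,
      fun i h hi2 => hhi i h (by omega)⟩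
  | succ n ih =>
    rw [pvBisect]
    by_cases hlt : lo < hi
    · simp only [hlt, dif_pos]
      have hmidlo : lo ≤ PySem.Int.floordiv (lo + hi) 2 :=
        (PySem.Int.le_floordiv_iff_mul_le (by omega)).2 (by omega)
      have hmidhi : PySem.Int.floordiv (lo + hi) 2 < hi :=
        (PySem.Int.floordiv_lt_iff_lt_mul (by omega)).2 (by omega)
      set mid := PySem.Int.floordiv (lo + hi) 2 with hmid
      have hmn : mid.toNat < cs.length := by omega
      have hget : PySem.List.pyGetD cs mid 0 = cs[mid.toNat] :=
        PySem.List.pyGetD_eq_getElem cs 0 (by omega) (by omega)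
      by_cases hcmp : PySem.List.pyGetD cs mid 0 < e
      · simp only [hcmp, if_pos]
        have hmide : cs[mid.toNat] < e := by rw [← hget]; exact hcmp
        obtain ⟨ha, hb, hc, hd⟩ := ih (mid + 1) hi (by omega) (by omega) (by omega) h2
          (fun i h hi2 => by
            have h1 : cs[i] ≤ cs[mid.toNat] := mono i mid.toNat h hmn (by omega)
            omega)
          hhi
        exact ⟨by omega, hb, hc, hd⟩
      · simp only [hcmp, if_neg, not_false_iff]
        have hmide : e ≤ cs[mid.toNat] := by
          have := not_lt.mp hcmp; rw [hget] at this; omega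
        obtain ⟨ha, hb, hc, hd⟩ := ih lo mid (by omega) h0 (by omega) (by omega) hlo
          (fun i h hi2 => by
            have h1 : cs[mid.toNat] ≤ cs[i] := mono mid.toNat i hmn h (by omega)
            omega)
        exact ⟨ha, by omega, hc, hd⟩
    · simp only [hlt, dif_neg, not_false_iff]
      exact ⟨le_refl _, by omega,
        fun i h hi2 => hlo i h hi2,
        fun i h hi2 => hhi i h (by omega)⟩

-- B's near: the binary-searched neighbour minimum is the minimum distance over the sorted list
theorem pv_near_spec (cs : List Int) (e : Int) (hp : cs.Pairwise (· ≤ ·)) (h : cs ≠ []) :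
    (∃ c ∈ cs, pvNear cs e = |e - c|) ∧ ∀ c ∈ cs, pvNear cs e ≤ |e - c| := by
  have hn0 : 0 < cs.length := List.length_pos_iff.2 h
  obtain ⟨h0r, h1r, hltr, hger⟩ :=
    pv_bisect_spec cs e hp cs.length 0 (cs.length : Int) (by omega) (by omega) (by omega)
      (by omega)
      (fun i hil hi2 => ((by omega : False)).elim)
      (fun i hil hi2 => ((by omega : False)).elim)
  unfold pvNear
  dsimp only
  set r := pvBisect cs e 0 (cs.length : Int) with hrdef
  have habs_lt : ∀ (i : Nat) (hi : i < cs.length), (i : Int) < r → |e - cs[i]| = e - cs[i] := by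
    intro i hi hir
    have := hltr i hi hir
    rw [abs_of_nonneg (by omega)]
  have habs_ge : ∀ (i : Nat) (hi : i < cs.length), r ≤ (i : Int) → |e - cs[i]| = cs[i] - e := by
    intro i hi hir
    have := hger i hi hir
    rw [abs_sub_comm, abs_of_nonneg (by omega)]
  by_cases hr0 : r > 0
  · have hpred : (r - 1).toNat < cs.length := by omega
    have hget1 : PySem.List.pyGetD cs (r - 1) 0 = cs[(r - 1).toNat] :=
      PySem.List.pyGetD_eq_getElem cs 0 (by omega) (by omega)
    have hcast1 : ((r - 1).toNat : Int) = r - 1 := by omega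
    have hd1 : e - PySem.List.pyGetD cs (r - 1) 0 = |e - cs[(r - 1).toNat]| := by
      rw [hget1, habs_lt _ hpred (by omega)]
    by_cases hrn : r < (cs.length : Int)
    · -- two candidates
      have hrlen : r.toNat < cs.length := by omega
      have hget2 : PySem.List.pyGetD cs r 0 = cs[r.toNat] :=
        PySem.List.pyGetD_eq_getElem cs 0 (by omega) (by omega)
      have hcast2 : (r.toNat : Int) = r := by omega
      have hd2 : PySem.List.pyGetD cs r 0 - e = |e - cs[r.toNat]| := by
        rw [hget2, habs_ge _ hrlen (by omega)]
      rw [if_pos hr0, if_pos hrn]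
      constructor
      · rcases le_total (e - PySem.List.pyGetD cs (r - 1) 0) (PySem.List.pyGetD cs r 0 - e) with hmin | hmin
        · exact ⟨cs[(r - 1).toNat], List.getElem_mem _, by
            simp only [List.cons_append, List.nil_append, List.foldl_cons, List.foldl_nil]
            rw [min_eq_left hmin]; exact hd1⟩
        · exact ⟨cs[r.toNat], List.getElem_mem _, by
            simp only [List.cons_append, List.nil_append, List.foldl_cons, List.foldl_nil]
            rw [min_eq_right hmin]; exact hd2⟩
      · intro c hc
        obtain ⟨i, hi, rfl⟩ := List.mem_iff_getElem.1 hc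
        simp only [List.cons_append, List.nil_append, List.foldl_cons, List.foldl_nil]
        rcases lt_or_ge (i : Int) r with hir | hir
        · have hmono : cs[i] ≤ cs[(r - 1).toNat] := by
            rcases Nat.lt_or_ge i (r - 1).toNat with hlt' | hge'
            · exact List.pairwise_iff_getElem.1 hp i (r - 1).toNat hi hpred hlt'
            · have : i = (r - 1).toNat := by omega
              subst this; exact le_refl _
          rw [habs_lt i hi hir]
          have h1 : e - PySem.List.pyGetD cs (r - 1) 0 ≤ e - cs[i] := by
            rw [hget1]; omega
          exact le_trans (min_le_left _ _) h1
        · have hmono : cs[r.toNat] ≤ cs[i] := by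
            rcases Nat.lt_or_ge r.toNat i with hlt' | hge'
            · exact List.pairwise_iff_getElem.1 hp r.toNat i hrlen hi hlt'
            · have : r.toNat = i := by omega
              subst this; exact le_refl _
          rw [habs_ge i hi hir]
          have h1 : PySem.List.pyGetD cs r 0 - e ≤ cs[i] - e := by
            rw [hget2]; omega
          exact le_trans (min_le_right _ _) h1
    · -- r = len: only the left candidate
      rw [if_pos hr0, if_neg hrn]
      simp only [List.append_nil, List.foldl_nil]
      constructor
      · exact ⟨cs[(r - 1).toNat], List.getElem_mem _, hd1⟩
      · intro c hc
        obtain ⟨i, hi, rfl⟩ := List.mem_iff_getElem.1 hc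
        have hir : (i : Int) < r := by omega
        have hmono : cs[i] ≤ cs[(r - 1).toNat] := by
          rcases Nat.lt_or_ge i (r - 1).toNat with hlt' | hge'
          · exact List.pairwise_iff_getElem.1 hp i (r - 1).toNat hi hpred hlt'
          · have : i = (r - 1).toNat := by omega
            subst this; exact le_refl _
        rw [habs_lt i hi hir, hget1]
        omega
  · -- r = 0: only the right candidate
    have hr0' : r = 0 := by omega
    have hrn : r < (cs.length : Int) := by omega
    have hrlen : r.toNat < cs.length := by omega
    have hget2 : PySem.List.pyGetD cs r 0 = cs[r.toNat] :=
      PySem.List.pyGetD_eq_getElem cs 0 (by omega) (by omega)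
    have hd2 : PySem.List.pyGetD cs r 0 - e = |e - cs[r.toNat]| := by
      rw [hget2, habs_ge _ hrlen (by omega)]
    rw [if_neg hr0, if_pos hrn]
    simp only [List.nil_append, List.foldl_nil]
    constructor
    · exact ⟨cs[r.toNat], List.getElem_mem _, hd2⟩
    · intro c hc
      obtain ⟨i, hi, rfl⟩ := List.mem_iff_getElem.1 hc
      have hir : r ≤ (i : Int) := by omega
      have hmono : cs[r.toNat] ≤ cs[i] := by
        rcases Nat.lt_or_ge r.toNat i with hlt' | hge'
        · exact List.pairwise_iff_getElem.1 hp r.toNat i hrlen hi hlt'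
        · have : r.toNat = i := by omega
          subst this; exact le_refl _
      rw [habs_ge i hi hir, hget2]
      omega

-- the value characterised by "a distance to some member, and ≤ every member's distance" is unique
theorem pv_min_unique {r1 r2 : Int} {l1 l2 : List Int} {f : Int → Int}
    (hmem : ∀ c, c ∈ l1 ↔ c ∈ l2)
    (h1 : ∃ c ∈ l1, r1 = f c) (h1' : ∀ c ∈ l1, r1 ≤ f c)
    (h2 : ∃ c ∈ l2, r2 = f c) (h2' : ∀ c ∈ l2, r2 ≤ f c) : r1 = r2 := by
  obtain ⟨c1, hc1, e1⟩ := h1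
  obtain ⟨c2, hc2, e2⟩ := h2
  have a1 : r1 ≤ f c2 := h1' c2 ((hmem c2).2 hc2)
  have a2 : r2 ≤ f c1 := h2' c1 ((hmem c1).1 hc1)
  omega

-- each query's distance agrees between the two ports
theorem pv_query_eq (angles : List Int) (h : angles ≠ []) (e : Int) :
    findDistanceOnCircle e angles
      = pvNear (PySem.List.sorted (angles.flatMap (fun v => [(-360 : Int), 0, 360].map (fun s => v + s))) (fun x => x) false) e := by
  set cs := PySem.List.sorted (angles.flatMap (fun v => [(-360 : Int), 0, 360].map (fun s => v + s))) (fun x => x) false with hcs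
  have hpw : cs.Pairwise (· ≤ ·) := by
    rw [hcs]
    exact PySem.List.sorted_pairwise (angles.flatMap (fun v => [(-360 : Int), 0, 360].map (fun s => v + s))) (fun x => x)
  have hmm : ∀ c, c ∈ pvCirc angles ↔ c ∈ cs := by
    intro c
    rw [hcs, PySem.List.mem_sorted]
    simp only [pvCirc, List.mem_flatMap, List.map_cons, List.map_nil, List.mem_cons,
      List.not_mem_nil, or_false]
    constructor <;> rintro ⟨v, hv, hc⟩ <;> exact ⟨v, hv, by omega⟩
  have hne : cs ≠ [] := by
    rw [hcs, Ne, PySem.List.sorted_eq_nil_iff]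
    obtain ⟨a, as, rfl⟩ := List.exists_cons_of_ne_nil h
    simp
  obtain ⟨hA1, hA2⟩ := pv_fdoc_spec e angles h
  obtain ⟨hB1, hB2⟩ := pv_near_spec cs e hpw hne
  exact pv_min_unique hmm hA1 hA2 hB1 hB2


-- ===== VERDICT (by name: the statement is the Claim_ definition above) =====
theorem rejectNonCornerMaximas_spec : Claim_equal_rejectNonCornerMaximas := by
  intro records maxdist _
  unfold Spec_rejectNonCornerMaximas rejectNonCornerMaximas rejectNonCornerMaximas_alt
  rw [pv_split]
  dsimp only
  simp only [List.nil_append]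
  set kept0 := records.filter (fun r => decide (r.2 > 100)) with hk0
  set S := PySem.List.sorted kept0 (fun x => x.1) false with hS
  by_cases h8 : (S.length == 8) = true
  · simp only [h8, if_pos]
  · simp only [h8, if_neg, Bool.not_eq_true]
    show S.foldl
        (fun result r =>
          if findDistanceOnCircle (r.1 + 90) (kept0.map (fun r => r.1)) < maxdist ∧
              findDistanceOnCircle (r.1 + 180) (kept0.map (fun r => r.1)) < maxdist ∧
              findDistanceOnCircle (r.1 - 90) (kept0.map (fun r => r.1)) < maxdist
            then result ++ [r] else result) []
      = S.filter (fun r =>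
          ([90, 180, -90] : List Int).all (fun s =>
            decide (pvNear (PySem.List.sorted ((kept0.map (fun r => r.1)).flatMap
              (fun v => [(-360 : Int), 0, 360].map (fun s => v + s))) (fun x => x) false)
              (r.1 + s) < maxdist)))
    rw [PySem.List.foldl_append_ite_eq_filter
      (p := fun r : Int × Int =>
        findDistanceOnCircle (r.1 + 90) (kept0.map (fun r => r.1)) < maxdist ∧
        findDistanceOnCircle (r.1 + 180) (kept0.map (fun r => r.1)) < maxdist ∧
        findDistanceOnCircle (r.1 - 90) (kept0.map (fun r => r.1)) < maxdist)]
    rw [List.nil_append]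
    apply List.filter_congr
    intro r hr
    have hrk : r ∈ kept0 := (PySem.List.mem_sorted kept0 (fun x => x.1) false r).1 hr
    have hang : kept0.map (fun r => r.1) ≠ [] := by
      simp only [Ne, List.map_eq_nil_iff]
      exact List.ne_nil_of_mem hrk
    have h90 : r.1 - 90 = r.1 + (-90) := by ring
    rw [pv_query_eq _ hang (r.1 + 90), pv_query_eq _ hang (r.1 + 180), h90,
      pv_query_eq _ hang (r.1 + (-90))]
    simp [List.all_cons, List.all_nil, Bool.decide_and, Bool.and_true]
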